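-- pv_equiv track=rewrite | github.com/ntutdanny0414/codeing365-practice | ds/family.py | nodelen
-- ===== SOURCE A (Python) =====
-- def nodelen(path1, path2):#need copy#
--     a = []
--     b = []
--     for i in range(0,len(path1)):#copy#
--         a.append(path1[i])
--     for i in range(0,len(path2)):
--         b.append(path2[i])
--     for i in range(0,len(a)):
--         for j in range(0,len(b)):#len will change#
--             if a[i] == b[j]:
--                 a[i] = ''
--                 b[j] = ''
--     while '' in a:#remove''#
--         a.remove('')
--     while '' in b:
--         b.remove('')
--     return len(a) + len(b)
-- ===== SOURCE B (Python) =====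
-- def nodelen(path1, path2):
--     # one-pass counter: +1 for each non-'' element of path1, -1 for each of path2;
--     # the unmatched total is the sum of absolute leftover counts.
--     diff = {}
--     for x in path1:
--         if x != '':
--             diff[x] = diff.get(x, 0) + 1
--     for y in path2:
--         if y != '':
--             diff[y] = diff.get(y, 0) - 1
--     return sum(abs(v) for v in diff.values())
-- ===== Notes on version B (the rewrite author's own statement) =====
-- stated objective: faster
-- what changed: Replaces A's quadratic blank-both-lists nested scan plus repeated remove('') passes by a single dictionary of signed counts (+1 per non-'' element of path1, -1 per element of path2) whose absolute values are summed.
import Mathlib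
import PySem

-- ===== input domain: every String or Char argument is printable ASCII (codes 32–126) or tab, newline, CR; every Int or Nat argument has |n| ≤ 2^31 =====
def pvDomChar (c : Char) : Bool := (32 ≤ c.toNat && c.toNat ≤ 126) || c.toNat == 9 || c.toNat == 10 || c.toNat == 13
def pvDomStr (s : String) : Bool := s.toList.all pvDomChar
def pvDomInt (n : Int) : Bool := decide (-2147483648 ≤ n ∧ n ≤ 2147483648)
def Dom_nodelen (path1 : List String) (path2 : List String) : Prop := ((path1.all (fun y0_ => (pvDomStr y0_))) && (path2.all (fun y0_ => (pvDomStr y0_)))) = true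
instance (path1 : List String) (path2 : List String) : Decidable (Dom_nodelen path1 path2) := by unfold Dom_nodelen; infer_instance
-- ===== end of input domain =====

-- B replaces A's quadratic blank-both-lists nested scan (plus repeated remove('') passes) by one pass
-- building a dictionary of signed counts whose absolute values are summed; return values are proved equal.


-- ===== PORT A =====
-- inner comparison: 'if a[i] == b[j]: a[i] = ""; b[j] = ""' (both indices are always in range, so getD with default "" is exact)
def nodelenStep (i : Nat) (ab : List String × List String) (j : Nat) : List String × List String :=
  if ab.1.getD i "" = ab.2.getD j "" then (ab.1.set i "", ab.2.set j "") else ab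

-- "while '' in l: l.remove('')": removes the first '' repeatedly until none is left, i.e. drops every ''
def removeBlanks : List String → List String
  | [] => []
  | x :: xs => if x = "" then removeBlanks xs else x :: removeBlanks xs

def nodelen (path1 : List String) (path2 : List String) : Int :=
  let a := (List.range path1.length).foldl (fun acc i => acc ++ [path1.getD i ""]) []
  let b := (List.range path2.length).foldl (fun acc i => acc ++ [path2.getD i ""]) []
  let ab := (List.range a.length).foldl
    (fun ab i => (List.range ab.2.length).foldl (nodelenStep i) ab) (a, b)
  ((removeBlanks ab.1).length : Int) + ((removeBlanks ab.2).length : Int)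

-- ===== PORT B =====
def nodelen_alt (path1 : List String) (path2 : List String) : Int :=
  let d1 := path1.foldl (fun d x => if x ≠ "" then d.insert x (d.getD x 0 + 1) else d)
      (PySem.Dict.empty (κ := String) (ν := Int))
  let d2 := path2.foldl (fun d y => if y ≠ "" then d.insert y (d.getD y 0 - 1) else d) d1
  (d2.values.map (fun v => |v|)).sum

-- ===== PRECONDITION & SPEC =====
def Spec_nodelen (path1 : List String) (path2 : List String) (out : Int) : Prop := out = nodelen_alt path1 path2
instance (path1 : List String) (path2 : List String) (out : Int) : Decidable (Spec_nodelen path1 path2 out) := by unfold Spec_nodelen; infer_instance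

-- ===== CLAIM (what is proved, stated in full; the proofs are below) =====
def Claim_equal_nodelen : Prop := ∀ (path1 : List String) (path2 : List String), Dom_nodelen path1 path2 → Spec_nodelen path1 path2 (nodelen path1 path2)

-- ===== LEMMAS AND PROOFS =====

-- the Bool form of the filter "element is not ''"
def fNB (s : String) : Bool := decide (s ≠ "")

lemma removeBlanks_eq_filter (l : List String) : removeBlanks l = l.filter fNB := by
  induction l with
  | nil => rfl
  | cons x xs ih => by_cases h : x = "" <;> simp [removeBlanks, fNB, h, ih]

lemma set_blank_self (l : List String) (i : Nat) (h : l.getD i "" = "") : l.set i "" = l := by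
  apply List.ext_getElem?
  intro n
  rw [List.getElem?_set]
  split
  · next hn =>
    subst hn
    split
    · next hlt =>
      simp [List.getD, List.getElem?_eq_getElem hlt] at h
      simp [List.getElem?_eq_getElem hlt, h]
    · next hlt =>
      exact (List.getElem?_eq_none (by omega)).symm
  · rfl

-- once a[i] is blank, the rest of the inner loop does nothing
lemma auxBlank (js : List Nat) (a b : List String) (i : Nat) (h : a.getD i "" = "") :
    js.foldl (nodelenStep i) (a, b) = (a, b) := by
  induction js with
  | nil => rfl
  | cons j js ih =>
    have hstep : nodelenStep i (a, b) j = (a, b) := by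
      unfold nodelenStep
      split
      · next hc =>
        simp only [h] at hc
        rw [set_blank_self a i h, set_blank_self b j hc.symm]
      · rfl
    simp [List.foldl_cons, hstep, ih]

-- the inner loop blanks a[i] together with the first b[j] equal to it (if any)
lemma auxInner (js : List Nat) (a b : List String) (i : Nat) (x : String)
    (hx : a.getD i "" = x) (hne : x ≠ "") :
    js.foldl (nodelenStep i) (a, b) =
      match js.find? (fun j => b.getD j "" == x) with
      | some j0 => (a.set i "", b.set j0 "")
      | none => (a, b) := by
  induction js with
  | nil => rfl
  | cons j js ih =>
    rw [List.find?_cons]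
    by_cases hj : b.getD j "" = x
    · have hstep : nodelenStep i (a, b) j = (a.set i "", b.set j "") := by
        unfold nodelenStep
        rw [if_pos (by rw [hx, hj])]
      have hi : i < a.length := by
        by_contra hge
        exact hne (by rw [← hx, List.getD_eq_default]; omega)
      have hblank : (a.set i "").getD i "" = "" := by
        simp [List.getD, hi]
      rw [List.foldl_cons, hstep, auxBlank js _ _ i hblank]
      have : (b.getD j "" == x) = true := by simpa using hj
      simp only [this]
    · have hstep : nodelenStep i (a, b) j = (a, b) := by
        unfold nodelenStep
        rw [if_neg (by rw [hx]; exact fun hc => hj hc.symm)]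
      have : (b.getD j "" == x) = false := by simpa using hj
      rw [List.foldl_cons, hstep, ih]
      simp only [this]

lemma find_range (b : List String) (x : String) :
    (List.range b.length).find? (fun j => b.getD j "" == x) =
      if x ∈ b then some (b.idxOf x) else none := by
  induction b with
  | nil => simp
  | cons y ys ih =>
    rw [List.length_cons, List.range_succ_eq_map, List.find?_cons]
    by_cases hy : y = x
    · subst hy
      simp [List.idxOf_cons_self]
    · have h0 : ((y :: ys).getD 0 "" == x) = false := by simpa using hy
      rw [h0, List.find?_map]
      have hcomp : ((fun j => (y :: ys).getD j "" == x) ∘ (· + 1)) = (fun j => ys.getD j "" == x) := by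
        funext j; simp [List.getD]
      rw [hcomp, ih]
      by_cases hm : x ∈ ys
      · have : x ∈ y :: ys := List.mem_cons_of_mem _ hm
        simp [hm, this, hy]
      · have : x ∉ y :: ys := by simp only [List.mem_cons, not_or]; exact ⟨fun h => hy h.symm, hm⟩
        simp [hm, this]

-- the net effect of the outer loop, as a structural recursion over the first list
def sim : List String → List String → List String × List String
  | [], b => ([], b)
  | x :: xs, b =>
    if x ≠ "" ∧ x ∈ b then
      let r := sim xs (b.set (b.idxOf x) "")
      ("" :: r.1, r.2)
    else
      let r := sim xs b
      (x :: r.1, r.2)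

lemma getD_append_len (pre : List String) (x : String) (xs : List String) :
    (pre ++ x :: xs).getD pre.length "" = x := by
  simp [List.getD]

lemma set_append_len (pre : List String) (x v : String) (xs : List String) :
    (pre ++ x :: xs).set pre.length v = pre ++ v :: xs := by
  rw [List.set_append]
  simp

lemma outer_eq_sim (suf : List String) : ∀ (pre b : List String),
    (List.range' pre.length suf.length).foldl
        (fun ab i => (List.range ab.2.length).foldl (nodelenStep i) ab) (pre ++ suf, b)
      = (pre ++ (sim suf b).1, (sim suf b).2) := by
  induction suf with
  | nil => intro pre b; simp [sim]
  | cons x xs ih =>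
    intro pre b
    rw [List.length_cons, List.range'_succ, List.foldl_cons]
    have hget : (pre ++ x :: xs).getD pre.length "" = x := getD_append_len pre x xs
    by_cases hx : x = ""
    · -- blank entry: the inner loop is the identity
      rw [auxBlank _ _ _ _ (by rw [hget, hx])]
      have := ih (pre ++ [x]) b
      simp only [List.append_assoc, List.singleton_append, List.length_append,
        List.length_singleton] at this
      rw [this]
      have hs : sim (x :: xs) b = (x :: (sim xs b).1, (sim xs b).2) := by
        rw [sim, if_neg (by tauto)]
      rw [hs, hx]
    · rw [auxInner _ _ _ _ x hget hx, find_range]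
      by_cases hm : x ∈ b
      · rw [if_pos hm, set_append_len]
        have := ih (pre ++ [""]) (b.set (b.idxOf x) "")
        simp only [List.append_assoc, List.singleton_append, List.length_append,
          List.length_singleton] at this
        show List.foldl _ (pre ++ "" :: xs, b.set (b.idxOf x) "") _ = _
        rw [this]
        have hs : sim (x :: xs) b = ("" :: (sim xs (b.set (b.idxOf x) "")).1, (sim xs (b.set (b.idxOf x) "")).2) := by
          rw [sim, if_pos ⟨hx, hm⟩]
        rw [hs]
      · rw [if_neg hm]
        have := ih (pre ++ [x]) b
        simp only [List.append_assoc, List.singleton_append, List.length_append,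
          List.length_singleton] at this
        show List.foldl _ (pre ++ x :: xs, b) _ = _
        rw [this]
        have hs : sim (x :: xs) b = (x :: (sim xs b).1, (sim xs b).2) := by
          rw [sim, if_neg (by tauto)]
        rw [hs]

-- greedy first-occurrence matching on the blank-free lists
def greedy : List String → List String → Int
  | [], b => (b.length : Int)
  | x :: xs, b => if x ∈ b then greedy xs (b.erase x) else greedy xs b + 1

lemma filter_set_idxOf (b : List String) (x : String) (hx : x ≠ "") (hm : x ∈ b) :
    (b.set (b.idxOf x) "").filter fNB = (b.filter fNB).erase x := by
  induction b with
  | nil => simp at hm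
  | cons y ys ih =>
    by_cases hy : y = x
    · subst hy
      rw [List.idxOf_cons_self, List.set_cons_zero]
      have hf : fNB y = true := by simp [fNB, hx]
      have hfb : fNB "" = false := by simp [fNB]
      rw [List.filter_cons, List.filter_cons, hfb, hf]
      simp [List.erase_cons_head]
    · have hm' : x ∈ ys := by
        rcases List.mem_cons.mp hm with h | h
        · exact absurd h.symm hy
        · exact h
      rw [List.idxOf_cons_ne _ (by exact fun h => hy h), List.set_cons_succ]
      by_cases hyb : y = ""
      · have hf : fNB y = false := by simp [fNB, hyb]
        simp [hf, ih hm']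
      · have hf : fNB y = true := by simp [fNB, hyb]
        simp only [List.filter_cons, hf, if_true]
        rw [List.erase_cons_tail (by simp [hy])]
        rw [ih hm']

lemma mem_filter_fNB (b : List String) (x : String) (hx : x ≠ "") : (x ∈ b.filter fNB) ↔ x ∈ b := by
  simp [List.mem_filter, fNB, hx]

lemma sim_count (a : List String) : ∀ (b : List String),
    ((((sim a b).1.filter fNB).length : Int) + (((sim a b).2.filter fNB).length : Int))
      = greedy (a.filter fNB) (b.filter fNB) := by
  induction a with
  | nil => intro b; simp [sim, greedy]
  | cons x xs ih =>
    intro b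
    by_cases hc : x ≠ "" ∧ x ∈ b
    · have hs : sim (x :: xs) b = ("" :: (sim xs (b.set (b.idxOf x) "")).1, (sim xs (b.set (b.idxOf x) "")).2) := by
        rw [sim, if_pos hc]
      have hfb : fNB "" = false := by simp [fNB]
      have hfx : fNB x = true := by simp [fNB, hc.1]
      rw [hs]
      simp only [List.filter_cons, hfb, hfx, if_false, if_true, Bool.false_eq_true]
      rw [ih, filter_set_idxOf b x hc.1 hc.2]
      have : greedy (x :: xs.filter fNB) (b.filter fNB) = greedy (xs.filter fNB) ((b.filter fNB).erase x) := by
        rw [greedy, if_pos ((mem_filter_fNB b x hc.1).mpr hc.2)]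
      rw [this]
    · have hs : sim (x :: xs) b = (x :: (sim xs b).1, (sim xs b).2) := by
        rw [sim, if_neg hc]
      rw [hs]
      by_cases hx : x = ""
      · have hfb : fNB x = false := by simp [fNB, hx]
        simp only [List.filter_cons, hfb, Bool.false_eq_true, if_false]
        exact ih b
      · have hm : x ∉ b := by tauto
        have hfx : fNB x = true := by simp [fNB, hx]
        simp only [List.filter_cons, hfx, if_true]
        have : greedy (x :: xs.filter fNB) (b.filter fNB) = greedy (xs.filter fNB) (b.filter fNB) + 1 := by
          rw [greedy, if_neg (fun h => hm ((mem_filter_fNB b x hx).mp h))]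
        rw [this, ← ih b]
        rw [List.length_cons]
        push_cast
        ring

lemma sum_map_split (L : List String) (f g : String → Int) :
    (L.map (fun k => f k + g k)).sum = (L.map f).sum + (L.map g).sum := by
  induction L with
  | nil => simp
  | cons z zs ih => simp only [List.map_cons, List.sum_cons, ih]; ring

lemma sum_indicator (L : List String) (x : String) (hL : L.Nodup) (hx : x ∈ L) :
    (L.map (fun k => if k = x then (1 : Int) else 0)).sum = 1 := by
  induction L with
  | nil => simp at hx
  | cons y ys ih =>
    by_cases he : y = x
    · subst he
      have hnot : y ∉ ys := (List.nodup_cons.mp hL).1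
      have hz : (ys.map (fun k => if k = y then (1 : Int) else 0)).sum = 0 := by
        rw [List.sum_eq_zero]
        intro v hv
        rcases List.mem_map.mp hv with ⟨k, hk, rfl⟩
        exact if_neg (fun he2 => hnot (by rwa [he2] at hk))
      simp [hz]
    · have hx' : x ∈ ys := by
        rcases List.mem_cons.mp hx with h | h
        · exact absurd h.symm he
        · exact h
      simp only [List.map_cons, List.sum_cons, if_neg he, zero_add]
      exact ih (List.nodup_cons.mp hL).2 hx'

lemma sum_count (b : List String) : ∀ (L : List String), L.Nodup → (∀ x ∈ b, x ∈ L) →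
    (L.map (fun k => (b.count k : Int))).sum = b.length := by
  induction b with
  | nil => intro L _ _; simp
  | cons y ys ih =>
    intro L hL hb
    have h1 : (L.map (fun k => ((y :: ys).count k : Int))).sum
        = (L.map (fun k => (ys.count k : Int) + (if k = y then (1 : Int) else 0))).sum := by
      congr 1
      apply List.map_congr_left
      intro k hk
      rw [List.count_cons]
      by_cases h : k = y
      · rw [if_pos (by simp [h]), if_pos h]
        push_cast; ring
      · rw [if_neg (by simp; exact fun he => h he.symm), if_neg h]
        push_cast; ring
    rw [h1, sum_map_split, ih L hL (fun x hx => hb x (List.mem_cons_of_mem _ hx)),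
        sum_indicator L y hL (hb y (List.mem_cons_self))]
    rw [List.length_cons]; push_cast; ring

lemma sum_succ_at (L : List String) (x : String) (f g : String → Int) (hL : L.Nodup) (hx : x ∈ L)
    (hfg : ∀ k ∈ L, k ≠ x → f k = g k) (hfx : f x = g x + 1) :
    (L.map f).sum = (L.map g).sum + 1 := by
  have h1 : (L.map f).sum = (L.map (fun k => g k + (if k = x then (1 : Int) else 0))).sum := by
    congr 1
    apply List.map_congr_left
    intro k hk
    by_cases h : k = x
    · subst h; rw [if_pos rfl, hfx]
    · rw [if_neg h, add_zero, hfg k hk h]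
  rw [h1, sum_map_split, sum_indicator L x hL hx]

lemma greedy_eq_sum (a : List String) : ∀ (b L : List String), L.Nodup →
    (∀ x ∈ a, x ∈ L) → (∀ x ∈ b, x ∈ L) →
    greedy a b = (L.map (fun k => |(a.count k : Int) - (b.count k : Int)|)).sum := by
  induction a with
  | nil =>
    intro b L hL _ hb
    have : (L.map (fun k => |((List.nil : List String).count k : Int) - (b.count k : Int)|)).sum
        = (L.map (fun k => (b.count k : Int))).sum := by
      congr 1; apply List.map_congr_left; intro k hk
      simp
    rw [greedy, this, sum_count b L hL hb]
  | cons x xs ih =>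
    intro b L hL ha hb
    have hxL : x ∈ L := ha x List.mem_cons_self
    by_cases hm : x ∈ b
    · rw [greedy, if_pos hm,
        ih (b.erase x) L hL (fun z hz => ha z (List.mem_cons_of_mem _ hz))
          (fun z hz => hb z (List.mem_of_mem_erase hz))]
      congr 1
      apply List.map_congr_left
      intro k hk
      by_cases h : k = x
      · subst h
        have hc : 1 ≤ b.count k := List.one_le_count_iff.mpr hm
        rw [List.count_cons_self, List.count_erase_self]
        push_cast [hc]
        congr 1
        ring
      · rw [List.count_cons_of_ne (fun he => h he.symm), List.count_erase_of_ne h]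
    · rw [greedy, if_neg hm, ih b L hL (fun z hz => ha z (List.mem_cons_of_mem _ hz)) hb]
      apply (sum_succ_at L x _ _ hL hxL ?_ ?_).symm
      · intro k hk hkx
        rw [List.count_cons_of_ne (fun he => hkx he.symm)]
      · have hc : b.count x = 0 := List.count_eq_zero.mpr hm
        rw [List.count_cons_self, hc]
        push_cast
        rw [sub_zero, sub_zero, abs_of_nonneg (by positivity), abs_of_nonneg (by positivity)]

lemma getD_foldl_insert_sub (l : List String) : ∀ (d : PySem.Dict String Int) (v : String),
    (l.foldl (fun d x => d.insert x (d.getD x 0 - 1)) d).getD v 0 = d.getD v 0 - l.count v := by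
  induction l with
  | nil => intro d v; simp
  | cons x xs ih =>
    intro d v
    rw [List.foldl_cons, ih, PySem.Dict.getD_insert, List.count_cons]
    by_cases h : v = x
    · subst h
      rw [if_pos rfl]
      simp only [BEq.rfl, if_pos]
      push_cast
      ring
    · rw [if_neg h]
      have : (x == v) = false := by simpa using fun he => h he.symm
      simp only [this, Bool.false_eq_true, if_false]
      push_cast
      ring

lemma values_abs_sum (d : PySem.Dict String Int) (h : d.keys.Nodup) :
    (d.values.map (fun v => |v|)).sum = (d.keys.map (fun k => |d.getD k 0|)).sum := by
  have hv : d.values = d.items.map (·.2) := rfl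
  have hk : d.keys = d.items.map (·.1) := rfl
  rw [hv, hk, List.map_map, List.map_map]
  congr 1
  apply List.map_congr_left
  intro p hp
  simp only [Function.comp]
  rw [PySem.Dict.getD_of_mem_items d (k := p.1) (v := p.2) (by simpa using hp) h 0]

lemma copy_loop (l : List String) :
    (List.range l.length).foldl (fun acc i => acc ++ [l.getD i ""]) [] = l := by
  rw [PySem.List.foldl_append_singleton_eq_map, List.nil_append]
  apply List.ext_getElem
  · simp
  · intro n h1 h2
    simp [List.getD, List.getElem?_eq_getElem h2]

lemma nodelen_eq_alt (path1 path2 : List String) : nodelen path1 path2 = nodelen_alt path1 path2 := by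
  -- names for the blank-free lists and the common key list
  set a' := path1.filter fNB with ha'
  set b' := path2.filter fNB with hb'
  set L := PySem.Set.ofList (a' ++ b') with hLdef
  have hLnodup : L.Nodup := PySem.Set.nodup_ofList _
  have hmemL : ∀ x, x ∈ a' ++ b' → x ∈ L := by
    intro x hx
    rw [hLdef, PySem.Set.mem_ofList]
    exact hx
  -- A side
  have hA : nodelen path1 path2
      = (L.map (fun k => |(a'.count k : Int) - (b'.count k : Int)|)).sum := by
    unfold nodelen
    dsimp only
    rw [copy_loop, copy_loop]
    have houter := outer_eq_sim path1 [] path2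
    simp only [List.nil_append, List.length_nil] at houter
    rw [List.range_eq_range', houter]
    rw [removeBlanks_eq_filter, removeBlanks_eq_filter, sim_count]
    exact greedy_eq_sum a' b' L hLnodup
      (fun x hx => hmemL x (List.mem_append_left _ hx))
      (fun x hx => hmemL x (List.mem_append_right _ hx))
  -- B side
  have hB : nodelen_alt path1 path2
      = (L.map (fun k => |(a'.count k : Int) - (b'.count k : Int)|)).sum := by
    unfold nodelen_alt
    dsimp only
    rw [PySem.List.foldl_ite_eq_foldl_filter, PySem.List.foldl_ite_eq_foldl_filter]
    have hd1 : (path1.filter (fun x => decide (x ≠ ""))).foldl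
        (fun d x => d.insert x (d.getD x 0 + 1)) (PySem.Dict.empty (κ := String) (ν := Int))
        = PySem.Dict.counter a' := by
      rw [← PySem.Dict.foldl_insert_getD_add_one_eq_counter]
      rfl
    rw [hd1]
    set d2 := (path2.filter (fun x => decide (x ≠ ""))).foldl
      (fun d y => d.insert y (d.getD y 0 - 1)) (PySem.Dict.counter a') with hd2
    have hkeys : d2.keys = L := by
      rw [hd2, PySem.Dict.keys_foldl_insert, PySem.Dict.keys_counter, hLdef,
        PySem.Set.ofList_eq_foldl, PySem.Set.ofList_eq_foldl, List.foldl_append]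
      rfl
    have hknodup : d2.keys.Nodup := by
      rw [hd2]
      exact PySem.Dict.nodup_keys_foldl_insert _ _ _ (PySem.Dict.nodup_keys_counter _)
    have hgetD : ∀ k, d2.getD k 0 = (a'.count k : Int) - (b'.count k : Int) := by
      intro k
      rw [hd2, getD_foldl_insert_sub, PySem.Dict.getD_counter]
      rfl
    rw [values_abs_sum d2 hknodup, hkeys]
    congr 1
    apply List.map_congr_left
    intro k hk
    rw [hgetD]
  rw [hA, hB]

-- ===== VERDICT (by name: the statement is the Claim_ definition above) =====
theorem nodelen_spec : Claim_equal_nodelen := by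
  intro path1 path2 _
  show nodelen path1 path2 = nodelen_alt path1 path2
  exact nodelen_eq_alt path1 path2
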